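-- pv_equiv track=rewrite | github.com/anrb15/ProyectoSEPA | csv_to_ir_array_from_samples_V2.py | clean_repeats
-- ===== SOURCE A (Python) =====
-- def clean_repeats(durations, levels, gap_threshold=20000):
--     """
--     Recorta la señal en cuanto aparece un GAP muy largo (>20 ms por defecto),
--     lo cual indica el fin del primer paquete IR.
--     """
--     cleaned_durations = []
--     cleaned_levels = []
--     for d, lvl in zip(durations, levels):
--         cleaned_durations.append(d)
--         cleaned_levels.append(lvl)
--         if d > gap_threshold:
--             break
--     return cleaned_durations, cleaned_levels
-- ===== SOURCE B (Python) =====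
-- def clean_repeats(durations, levels, gap_threshold=20000):
--     n = min(len(durations), len(levels))
--     idx = next((i for i, d in enumerate(durations[:n]) if d > gap_threshold), None)
--     cut = n if idx is None else idx + 1
--     return durations[:cut], levels[:cut]
-- ===== Notes on version B (the rewrite author's own statement) =====
-- stated objective: simpler
-- what changed: Replaced the interleaved append-and-break loop with a find-first-gap-index then slice-both-lists decomposition (next over enumerate, then two slices).
import Mathlib
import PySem

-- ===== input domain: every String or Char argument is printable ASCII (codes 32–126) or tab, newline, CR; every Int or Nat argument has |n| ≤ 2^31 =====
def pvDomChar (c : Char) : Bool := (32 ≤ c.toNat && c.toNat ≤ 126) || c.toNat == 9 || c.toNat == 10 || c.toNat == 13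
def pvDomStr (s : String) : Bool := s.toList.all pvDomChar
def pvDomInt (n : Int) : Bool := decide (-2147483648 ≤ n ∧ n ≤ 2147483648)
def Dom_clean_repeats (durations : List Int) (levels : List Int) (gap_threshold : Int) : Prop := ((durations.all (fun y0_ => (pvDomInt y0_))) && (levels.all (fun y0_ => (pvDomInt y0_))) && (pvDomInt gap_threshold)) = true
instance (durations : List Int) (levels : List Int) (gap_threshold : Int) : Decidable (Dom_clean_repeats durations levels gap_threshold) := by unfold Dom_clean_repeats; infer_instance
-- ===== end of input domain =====

-- B replaces A's interleaved append-and-break loop by find-first-gap-index then slice; objective: simpler.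
-- ===== PORT A =====
-- the for-loop over zip(durations, levels) with append/append/break, as structural recursion
def pvLoopA : List (Int × Int) → Int → List Int × List Int
  | [], _ => ([], [])
  | (d, lvl) :: rest, g =>
    if d > g then ([d], [lvl])
    else
      let p := pvLoopA rest g
      (d :: p.1, lvl :: p.2)

def clean_repeats (durations : List Int) (levels : List Int) (gap_threshold : Int) : List Int × List Int :=
  pvLoopA (durations.zip levels) gap_threshold

-- ===== PORT B =====
def clean_repeats_alt (durations : List Int) (levels : List Int) (gap_threshold : Int) : List Int × List Int :=
  let n := min durations.length levels.length
  let cut := match (durations.take n).findIdx? (fun d => d > gap_threshold) with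
    | none => n
    | some i => i + 1
  (durations.take cut, levels.take cut)

-- ===== PRECONDITION & SPEC =====
def Spec_clean_repeats (durations : List Int) (levels : List Int) (gap_threshold : Int) (out : List Int × List Int) : Prop := out = clean_repeats_alt durations levels gap_threshold
instance (durations : List Int) (levels : List Int) (gap_threshold : Int) (out : List Int × List Int) : Decidable (Spec_clean_repeats durations levels gap_threshold out) := by unfold Spec_clean_repeats; infer_instance

-- ===== CLAIM =====
def Claim_equal_clean_repeats : Prop := ∀ (durations : List Int) (levels : List Int) (gap_threshold : Int), Dom_clean_repeats durations levels gap_threshold → Spec_clean_repeats durations levels gap_threshold (clean_repeats durations levels gap_threshold)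

-- ===== LEMMAS AND PROOFS =====
theorem pvLoopA_eq_alt (durations levels : List Int) (g : Int) :
    pvLoopA (durations.zip levels) g = clean_repeats_alt durations levels g := by
  induction durations generalizing levels with
  | nil => simp [pvLoopA, clean_repeats_alt]
  | cons d ds ih =>
    cases levels with
    | nil => simp [pvLoopA, clean_repeats_alt]
    | cons l ls =>
      simp only [List.zip_cons_cons, pvLoopA]
      by_cases hd : d > g
      · simp [clean_repeats_alt, hd, Nat.succ_min_succ, List.findIdx?_cons]
      · rw [ih ls]
        simp only [clean_repeats_alt, List.length_cons, Nat.succ_min_succ,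
          List.take_succ_cons, List.findIdx?_cons, decide_eq_true_eq]
        rw [if_neg hd]
        cases hfi : ((ds.take (min ds.length ls.length)).findIdx? (fun x => decide (x > g))) with
        | none => simp [hd]
        | some i => simp [hd]

-- ===== VERDICT =====
theorem clean_repeats_spec : Claim_equal_clean_repeats := by
  intro ds ls g _
  unfold Spec_clean_repeats clean_repeats
  exact pvLoopA_eq_alt ds ls g
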